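-- pv_equiv track=rewrite | github.com/SadafAsad/Algorithms | Greedy/Huffman Coding.py | fixSize
-- ===== SOURCE A (Python) =====
-- def fixSize(in_string):
--     counter = 0
--     char_string = list(in_string)
--     while char_string!=[]:
--         a = char_string[0]
--         counter+=1
--         j = 0
--         while j<len(char_string):
--             if char_string[j]==a:
--                 char_string.pop(j)
--                 j=0
--             else:
--                 j+=1
--     i=0
--     while 2*i<counter:
--         i+=1
--     table_bit = 8*counter + i*counter
--     string_bit = len(in_string)*i
--     return table_bit+string_bit
-- ===== SOURCE B (Python) =====
-- def fixSize(in_string):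
--     counter = len(set(in_string))
--     i = (counter + 1) // 2
--     return 8 * counter + i * counter + len(in_string) * i
-- ===== Notes on version B (the rewrite author's own statement) =====
-- stated objective: faster
-- what changed: Replaces the quadratic pop-and-rescan distinct-character loop with a set, and the linear search for the smallest i with 2*i >= counter with the closed form (counter+1)//2.
import Mathlib
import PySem

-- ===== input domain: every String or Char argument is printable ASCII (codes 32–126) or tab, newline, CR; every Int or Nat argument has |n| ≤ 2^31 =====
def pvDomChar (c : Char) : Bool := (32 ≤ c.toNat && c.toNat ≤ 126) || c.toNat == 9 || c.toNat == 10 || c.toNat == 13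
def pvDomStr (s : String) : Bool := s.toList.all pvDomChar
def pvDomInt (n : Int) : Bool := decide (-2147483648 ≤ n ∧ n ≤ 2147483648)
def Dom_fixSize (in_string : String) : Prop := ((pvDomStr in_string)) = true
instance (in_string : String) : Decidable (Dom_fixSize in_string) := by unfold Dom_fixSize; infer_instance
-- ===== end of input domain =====

-- B replaces A's quadratic pop-and-rescan distinct-count loop by len(set(..)) and A's
-- linear search for the least i with 2*i >= counter by the closed form (counter+1)//2.

-- ===== PORT A =====
-- inner while loop: scan char_string from j, popping every element equal to a (and resetting
-- j to 0).  fuel is only a termination guard: it starts at len*len+len+1, strictly above the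
-- loop's decreasing potential len*len+len-j, so it can never run out (proved below).
def fixSizeInner (fuel : Nat) (cs : List Char) (j : Nat) (a : Char) : List Char :=
  match fuel with
  | 0 => cs
  | fuel + 1 =>
    if h : j < cs.length then
      if cs[j] = a then
        fixSizeInner fuel (cs.eraseIdx j) 0 a   -- char_string.pop(j); j = 0  (j is in range, so pop = eraseIdx)
      else
        fixSizeInner fuel cs (j + 1) a
    else cs

-- outer while loop: counter counts the rounds; fuel (= len+1 at the call) is only a
-- termination guard, strictly above the shrinking list's length, so it can never run out.
def fixSizeOuter (fuel : Nat) (cs : List Char) (counter : Nat) : Nat :=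
  match fuel with
  | 0 => counter
  | fuel + 1 =>
    match cs with
    | [] => counter
    | a :: rest =>
        let cs' := fixSizeInner ((a :: rest).length * (a :: rest).length + (a :: rest).length + 1) (a :: rest) 0 a
        fixSizeOuter fuel cs' (counter + 1)

-- while 2*i < counter: i += 1;  fuel (= counter at the call) can never run out
def fixSizeILoop (fuel : Nat) (i counter : Nat) : Nat :=
  match fuel with
  | 0 => i
  | fuel + 1 => if 2 * i < counter then fixSizeILoop fuel (i + 1) counter else i

def fixSize (in_string : String) : Int :=
  let counter := fixSizeOuter (in_string.toList.length + 1) in_string.toList 0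
  let i := fixSizeILoop counter 0 counter
  let table_bit : Int := 8 * counter + i * counter
  let string_bit : Int := (in_string.toList.length : Int) * i
  table_bit + string_bit

-- ===== PORT B =====
def fixSize_alt (in_string : String) : Int :=
  let counter : Int := (PySem.Set.ofList in_string.toList).length   -- len(set(in_string))
  let i : Int := PySem.Int.floordiv (counter + 1) 2                 -- (counter + 1) // 2
  8 * counter + i * counter + (in_string.toList.length : Int) * i

-- ===== PRECONDITION & SPEC =====
def Spec_fixSize (in_string : String) (out : Int) : Prop := out = fixSize_alt in_string
instance (in_string : String) (out : Int) : Decidable (Spec_fixSize in_string out) := by unfold Spec_fixSize; infer_instance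

-- ===== CLAIM (what is proved, stated in full; the proofs are below) =====
def Claim_equal_fixSize : Prop := ∀ (in_string : String), Dom_fixSize in_string → Spec_fixSize in_string (fixSize in_string)

-- ===== LEMMAS AND PROOFS =====

-- with enough fuel the i-loop computes the ceiling of counter/2
theorem fixSizeILoop_eq (fuel : Nat) : ∀ i c : Nat, i ≤ (c + 1) / 2 → (c + 1) / 2 ≤ fuel + i →
    fixSizeILoop fuel i c = (c + 1) / 2 := by
  induction fuel with
  | zero => intro i c h1 h2; simp only [fixSizeILoop]; omega
  | succ fuel ih =>
      intro i c h1 h2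
      simp only [fixSizeILoop]
      split
      · exact ih (i + 1) c (by omega) (by omega)
      · omega

-- with fuel above the potential len*len+len-j, the inner loop removes exactly the
-- occurrences of a, provided the prefix before j is a-free
theorem fixSizeInner_eq_filter (fuel : Nat) :
    ∀ (cs : List Char) (j : Nat) (a : Char), (∀ x ∈ cs.take j, x ≠ a) →
      cs.length * cs.length + cs.length < fuel + j →
      fixSizeInner fuel cs j a = cs.filter (fun x => x ≠ a) := by
  induction fuel with
  | zero =>
      intro cs j a hpre hfuel
      have hj : cs.length ≤ j := by
        have : cs.length ≤ cs.length * cs.length + cs.length := Nat.le_add_left _ _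
        omega
      simp only [fixSizeInner]
      rw [List.take_of_length_le hj] at hpre
      symm; rw [List.filter_eq_self]
      intro x hx; simpa using hpre x hx
  | succ fuel ih =>
      intro cs j a hpre hfuel
      simp only [fixSizeInner]
      split
      · rename_i h
        split
        · rename_i heq
          rw [ih (cs.eraseIdx j) 0 a (by simp) (by
            rw [List.length_eraseIdx_of_lt h]
            obtain ⟨M, hM⟩ : ∃ M, cs.length = M + 1 := ⟨cs.length - 1, by omega⟩
            rw [hM] at hfuel ⊢
            have hj : j ≤ M := by omega
            have hr : (M + 1) * (M + 1) + (M + 1) = M * M + 3 * M + 2 := by ring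
            rw [hr] at hfuel
            simp only [Nat.add_sub_cancel]
            linarith)]
          have hsplit : cs = cs.take j ++ cs[j] :: cs.drop (j + 1) := by
            conv_lhs => rw [← List.take_append_drop j cs]
            rw [List.drop_eq_getElem_cons h]
          rw [List.eraseIdx_eq_take_drop_succ]
          conv_rhs => rw [hsplit]
          simp [List.filter_append, heq]
        · rename_i hne
          refine ih cs (j + 1) a ?_ (by omega)
          intro x hx
          rw [List.take_add_one, List.getElem?_eq_getElem h] at hx
          simp only [List.mem_append, Option.toList_some, List.mem_singleton] at hx
          rcases hx with hx | hx
          · exact hpre x hx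
          · subst hx; exact hne
      · rename_i h
        rw [List.take_of_length_le (by omega)] at hpre
        symm; rw [List.filter_eq_self]
        intro x hx; simpa using hpre x hx

-- distinct count shrinks by exactly one when the head's occurrences are filtered out
theorem ofList_length_cons (a : Char) (rest : List Char) :
    (PySem.Set.ofList (a :: rest)).length
      = 1 + (PySem.Set.ofList (rest.filter (fun x => x ≠ a))).length := by
  have hn1 : (PySem.Set.ofList (a :: rest)).Nodup := PySem.Set.nodup_ofList _
  have hn2 : (a :: PySem.Set.ofList (rest.filter (fun x => x ≠ a))).Nodup := by
    rw [List.nodup_cons]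
    constructor
    · intro hmem
      rw [PySem.Set.mem_ofList] at hmem
      simp at hmem
    · exact PySem.Set.nodup_ofList _
  have hperm : (PySem.Set.ofList (a :: rest)).Perm
      (a :: PySem.Set.ofList (rest.filter (fun x => x ≠ a))) := by
    rw [List.perm_ext_iff_of_nodup hn1 hn2]
    intro x
    simp only [PySem.Set.mem_ofList, List.mem_cons, List.mem_filter]
    by_cases hxa : x = a <;> simp [hxa]
  have := hperm.length_eq
  simp only [List.length_cons] at this
  omega

-- with fuel above the list's length, the outer loop counts the distinct characters
theorem fixSizeOuter_eq (fuel : Nat) : ∀ (cs : List Char) (counter : Nat), cs.length < fuel →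
    fixSizeOuter fuel cs counter = counter + (PySem.Set.ofList cs).length := by
  induction fuel with
  | zero => intro cs counter h; omega
  | succ fuel ih =>
      intro cs counter h
      match cs with
      | [] => simp [fixSizeOuter, PySem.Set.ofList]
      | a :: rest =>
          simp only [fixSizeOuter]
          have hinner : fixSizeInner ((a :: rest).length * (a :: rest).length + (a :: rest).length + 1)
              (a :: rest) 0 a = rest.filter (fun x => x ≠ a) := by
            rw [fixSizeInner_eq_filter _ (a :: rest) 0 a (by simp) (by omega)]
            simp
          rw [hinner, ih _ _ (by
            have := List.length_filter_le (fun x => decide (x ≠ a)) rest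
            simp only [List.length_cons] at h
            omega)]
          rw [ofList_length_cons]
          omega

-- ===== VERDICT (by name: the statement is the Claim_ definition above) =====
theorem fixSize_spec : Claim_equal_fixSize := by
  intro s _
  have hc : fixSizeOuter (s.toList.length + 1) s.toList 0 = (PySem.Set.ofList s.toList).length := by
    simpa using fixSizeOuter_eq (s.toList.length + 1) s.toList 0 (by omega)
  have hlen : (PySem.Set.ofList s.toList).length ≤ s.toList.length :=
    PySem.Set.length_ofList_le s.toList
  have hi : fixSizeILoop ((PySem.Set.ofList s.toList).length) 0 ((PySem.Set.ofList s.toList).length)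
      = ((PySem.Set.ofList s.toList).length + 1) / 2 :=
    fixSizeILoop_eq _ 0 _ (by omega) (by omega)
  have hfd : PySem.Int.floordiv (((PySem.Set.ofList s.toList).length : Int) + 1) 2
      = ((((PySem.Set.ofList s.toList).length + 1) / 2 : Nat) : Int) := by
    have := PySem.Int.floordiv_natCast ((PySem.Set.ofList s.toList).length + 1) 2
    push_cast at this ⊢
    exact this
  simp only [Spec_fixSize, fixSize, fixSize_alt, hc, hi, hfd]
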